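-- pv_equiv track=rewrite | github.com/snpathaks/codeclash-hackathon | server/server.py | detect_presentation_type
-- ===== SOURCE A (Python) =====
-- def detect_presentation_type(prompt: str) -> str:
--     """Intelligently detect presentation type from prompt"""
--     prompt_lower = prompt.lower()
--
--     # Business keywords
--     if any(word in prompt_lower for word in ['business', 'strategy', 'market', 'revenue', 'profit', 'company', 'startup', 'sales']):
--         return 'business'
--
--     # Educational keywords
--     if any(word in prompt_lower for word in ['learn', 'teach', 'education', 'course', 'lesson', 'tutorial', 'explain']):
--         return 'educational'
--
--     # Technical keywords
--     if any(word in prompt_lower for word in ['technical', 'software', 'system', 'code', 'architecture', 'api', 'database']):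
--         return 'technical'
--
--     # Creative keywords
--     if any(word in prompt_lower for word in ['creative', 'design', 'art', 'concept', 'vision', 'innovative']):
--         return 'creative'
--
--     return 'business'  # Default fallback
-- ===== SOURCE B (Python) =====
-- # B: single position-scan matcher. Instead of running a separate substring
-- # search per keyword per category, lowercase once and sweep the text left to
-- # right a single time; at each position, any keyword starting there marks its
-- # category in a found-set (via a flat keyword->type map). Finally return the
-- # highest-priority found category, defaulting to 'business'.
-- _KEYWORD_TYPE = [
--     ('business', 'business'), ('strategy', 'business'), ('market', 'business'),
--     ('revenue', 'business'), ('profit', 'business'), ('company', 'business'),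
--     ('startup', 'business'), ('sales', 'business'),
--     ('learn', 'educational'), ('teach', 'educational'), ('education', 'educational'),
--     ('course', 'educational'), ('lesson', 'educational'), ('tutorial', 'educational'),
--     ('explain', 'educational'),
--     ('technical', 'technical'), ('software', 'technical'), ('system', 'technical'),
--     ('code', 'technical'), ('architecture', 'technical'), ('api', 'technical'),
--     ('database', 'technical'),
--     ('creative', 'creative'), ('design', 'creative'), ('art', 'creative'),
--     ('concept', 'creative'), ('vision', 'creative'), ('innovative', 'creative'),
-- ]
-- _PRIORITY = ['business', 'educational', 'technical', 'creative']
--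
-- def detect_presentation_type(prompt: str) -> str:
--     text = prompt.lower()
--     found = set()
--     for i in range(len(text)):
--         for kw, ptype in _KEYWORD_TYPE:
--             if ptype not in found and text.startswith(kw, i):
--                 found.add(ptype)
--     for ptype in _PRIORITY:
--         if ptype in found:
--             return ptype
--     return 'business'
-- ===== Notes on version B (the rewrite author's own statement) =====
-- stated objective: alternative
-- what changed: A runs an independent substring search per keyword per category with four early-return branches; B makes one left-to-right scan over the lowered text, marking categories in a found-set via a flat keyword-to-type map (startswith at each position), then returns the first matched category in priority order.
import Mathlib
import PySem

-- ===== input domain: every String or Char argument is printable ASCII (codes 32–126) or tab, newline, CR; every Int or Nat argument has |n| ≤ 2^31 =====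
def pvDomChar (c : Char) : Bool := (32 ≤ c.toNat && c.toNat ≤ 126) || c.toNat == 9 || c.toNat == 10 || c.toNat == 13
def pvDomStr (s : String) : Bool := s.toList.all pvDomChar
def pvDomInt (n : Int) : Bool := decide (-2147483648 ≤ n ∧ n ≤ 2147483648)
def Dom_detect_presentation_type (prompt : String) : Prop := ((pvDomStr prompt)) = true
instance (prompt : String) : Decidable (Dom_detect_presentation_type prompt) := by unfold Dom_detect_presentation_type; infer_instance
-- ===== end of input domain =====

-- B replaces A's per-category substring searches by a single left-to-right scan of the
-- lowered text that accumulates the set of matched categories via a flat keyword→type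
-- map, then returns the highest-priority matched category (alternative algorithm).

-- ===== PORT A =====
def detect_presentation_type (prompt : String) : String :=
  let prompt_lower := PySem.Str.lower prompt
  if (["business", "strategy", "market", "revenue", "profit", "company", "startup", "sales"].any
      (fun word => PySem.Str.isIn word prompt_lower)) then "business"
  else if (["learn", "teach", "education", "course", "lesson", "tutorial", "explain"].any
      (fun word => PySem.Str.isIn word prompt_lower)) then "educational"
  else if (["technical", "software", "system", "code", "architecture", "api", "database"].any
      (fun word => PySem.Str.isIn word prompt_lower)) then "technical"
  else if (["creative", "design", "art", "concept", "vision", "innovative"].any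
      (fun word => PySem.Str.isIn word prompt_lower)) then "creative"
  else "business"

-- ===== PORT B =====
def pvKwType : List (String × String) :=
  [("business", "business"), ("strategy", "business"), ("market", "business"),
   ("revenue", "business"), ("profit", "business"), ("company", "business"),
   ("startup", "business"), ("sales", "business"),
   ("learn", "educational"), ("teach", "educational"), ("education", "educational"),
   ("course", "educational"), ("lesson", "educational"), ("tutorial", "educational"),
   ("explain", "educational"),
   ("technical", "technical"), ("software", "technical"), ("system", "technical"),
   ("code", "technical"), ("architecture", "technical"), ("api", "technical"),
   ("database", "technical"),
   ("creative", "creative"), ("design", "creative"), ("art", "creative"),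
   ("concept", "creative"), ("vision", "creative"), ("innovative", "creative")]

def pvPriority : List String := ["business", "educational", "technical", "creative"]

-- Python's text.startswith(kw, i) with 0 ≤ i ≤ len(text) is exactly "kw is a prefix of
-- text[i:]": ported as isPrefixOf on the dropped char list (exact on that index range,
-- the only one the scan uses).
def pvInner (text : List Char) (i : Nat) (found : PySem.Set String) : PySem.Set String :=
  pvKwType.foldl (fun fd p =>
    if ¬ PySem.Set.contains fd p.2 ∧ p.1.toList.isPrefixOf (text.drop i) then
      PySem.Set.add fd p.2
    else fd) found

def pvScan (text : List Char) : PySem.Set String :=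
  (List.range text.length).foldl (fun fd i => pvInner text i fd) PySem.Set.empty

def pvFirstFound : List String → PySem.Set String → String
  | [], _ => "business"
  | t :: rest, found => if PySem.Set.contains found t then t else pvFirstFound rest found

def detect_presentation_type_alt (prompt : String) : String :=
  pvFirstFound pvPriority (pvScan (PySem.Str.lower prompt).toList)

-- ===== PRECONDITION & SPEC =====
def Spec_detect_presentation_type (prompt : String) (out : String) : Prop := out = detect_presentation_type_alt prompt
instance (prompt : String) (out : String) : Decidable (Spec_detect_presentation_type prompt out) := by unfold Spec_detect_presentation_type; infer_instance

-- ===== CLAIM (what is proved, stated in full; the proofs are below) =====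
def Claim_equal_detect_presentation_type : Prop := ∀ (prompt : String), Dom_detect_presentation_type prompt → Spec_detect_presentation_type prompt (detect_presentation_type prompt)

-- ===== LEMMAS AND PROOFS =====

-- inner keyword-table fold: what ends up in the found-set
theorem pv_mem_innerFold (table : List (String × String)) (s : List Char)
    (found : PySem.Set String) (t : String) :
    (t ∈ table.foldl (fun fd p =>
        if ¬ PySem.Set.contains fd p.2 ∧ p.1.toList.isPrefixOf s then
          PySem.Set.add fd p.2
        else fd) found) ↔ t ∈ found ∨ ∃ p ∈ table, p.2 = t ∧ p.1.toList <+: s := by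
  induction table generalizing found with
  | nil => simp
  | cons p rest ih =>
    simp only [List.foldl_cons, ih, List.mem_cons]
    by_cases hc : ¬ PySem.Set.contains found p.2 = true ∧ p.1.toList.isPrefixOf s = true
    · simp only [if_pos hc, PySem.Set.mem_add]
      have hpre : p.1.toList <+: s := List.isPrefixOf_iff_prefix.mp hc.2
      constructor
      · rintro (⟨h | rfl⟩ | ⟨q, hq, h2, h3⟩)
        · exact Or.inl h
        · exact Or.inr ⟨p, Or.inl rfl, rfl, hpre⟩
        · exact Or.inr ⟨q, Or.inr hq, h2, h3⟩
      · rintro (h | ⟨q, (rfl | hq), h2, h3⟩)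
        · exact Or.inl (Or.inl h)
        · exact Or.inl (Or.inr h2.symm)
        · exact Or.inr ⟨q, hq, h2, h3⟩
    · simp only [if_neg hc]
      rw [not_and_or, not_not] at hc
      constructor
      · rintro (h | ⟨q, hq, h2, h3⟩)
        · exact Or.inl h
        · exact Or.inr ⟨q, Or.inr hq, h2, h3⟩
      · rintro (h | ⟨q, (rfl | hq), h2, h3⟩)
        · exact Or.inl h
        · rcases hc with h' | h'
          · exact Or.inl (h2 ▸ (PySem.Set.contains_iff found q.2).mp h')
          · exact absurd (List.isPrefixOf_iff_prefix.mpr h3) h'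
        · exact Or.inr ⟨q, hq, h2, h3⟩

-- outer position fold
theorem pv_mem_posFold (l : List Nat) (text : List Char)
    (found : PySem.Set String) (t : String) :
    (t ∈ l.foldl (fun fd i => pvInner text i fd) found) ↔
      t ∈ found ∨ ∃ i ∈ l, ∃ p ∈ pvKwType, p.2 = t ∧ p.1.toList <+: text.drop i := by
  induction l generalizing found with
  | nil => simp
  | cons i rest ih =>
    rw [List.foldl_cons, ih]
    unfold pvInner
    rw [pv_mem_innerFold]
    simp only [List.mem_cons]
    constructor
    · rintro ((h | ⟨p, hp, h2, h3⟩) | ⟨j, hj, p, hp, h2, h3⟩)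
      · exact Or.inl h
      · exact Or.inr ⟨i, Or.inl rfl, p, hp, h2, h3⟩
      · exact Or.inr ⟨j, Or.inr hj, p, hp, h2, h3⟩
    · rintro (h | ⟨j, (rfl | hj), p, hp, h2, h3⟩)
      · exact Or.inl (Or.inl h)
      · exact Or.inl (Or.inr ⟨p, hp, h2, h3⟩)
      · exact Or.inr ⟨j, hj, p, hp, h2, h3⟩

theorem pv_kw_nonempty : ∀ p ∈ pvKwType, p.1.toList ≠ [] := by decide

theorem pv_mem_scan (text : List Char) (t : String) :
    t ∈ pvScan text ↔ ∃ p ∈ pvKwType, p.2 = t ∧ ∃ j, p.1.toList <+: text.drop j := by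
  unfold pvScan
  rw [pv_mem_posFold]
  simp only [PySem.Set.empty, List.not_mem_nil, false_or, List.mem_range]
  constructor
  · rintro ⟨i, _, p, hp, h2, h3⟩
    exact ⟨p, hp, h2, i, h3⟩
  · rintro ⟨p, hp, h2, j, h3⟩
    by_cases hlt : j < text.length
    · exact ⟨j, hlt, p, hp, h2, h3⟩
    · exfalso
      rw [List.drop_eq_nil_of_le (le_of_not_gt hlt), List.prefix_nil] at h3
      exact pv_kw_nonempty p hp h3

theorem pv_contains_scan (text : List Char) (t : String) :
    PySem.Set.contains (pvScan text) t = true ↔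
      ∃ p ∈ pvKwType, p.2 = t ∧ PySem.Chars.isIn p.1.toList text = true := by
  rw [PySem.Set.contains_iff, pv_mem_scan]
  constructor
  · rintro ⟨p, hp, h2, j, h3⟩
    exact ⟨p, hp, h2, (PySem.Chars.exists_prefix_drop_iff_isIn p.1.toList text).mp ⟨j, h3⟩⟩
  · rintro ⟨p, hp, h2, h3⟩
    obtain ⟨j, hj⟩ := (PySem.Chars.exists_prefix_drop_iff_isIn p.1.toList text).mpr h3
    exact ⟨p, hp, h2, j, hj⟩

theorem pv_scan_cat (s : List Char) (c : String) (words : List String)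
    (hw : ∀ p ∈ pvKwType, p.2 = c → p.1 ∈ words)
    (hc : ∀ w ∈ words, ∃ p ∈ pvKwType, p.1 = w ∧ p.2 = c) :
    PySem.Set.contains (pvScan s) c = words.any (fun w => PySem.Chars.isIn w.toList s) := by
  rw [Bool.eq_iff_iff, pv_contains_scan]
  simp only [List.any_eq_true]
  constructor
  · rintro ⟨p, hp, h2, h3⟩
    exact ⟨p.1, hw p hp h2, h3⟩
  · rintro ⟨w, hwmem, hin⟩
    obtain ⟨p, hp, h1, h2⟩ := hc w hwmem
    exact ⟨p, hp, h2, by rw [h1]; exact hin⟩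

-- ===== VERDICT (by name: the statement is the Claim_ definition above) =====
theorem detect_presentation_type_spec : Claim_equal_detect_presentation_type := by
  intro prompt _
  unfold Spec_detect_presentation_type
  simp only [detect_presentation_type, detect_presentation_type_alt]
  set s := (PySem.Str.lower prompt).toList with hs
  have hb := pv_scan_cat s "business"
    ["business", "strategy", "market", "revenue", "profit", "company", "startup", "sales"]
    (by decide) (by decide)
  have he := pv_scan_cat s "educational"
    ["learn", "teach", "education", "course", "lesson", "tutorial", "explain"]
    (by decide) (by decide)
  have ht := pv_scan_cat s "technical"
    ["technical", "software", "system", "code", "architecture", "api", "database"]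
    (by decide) (by decide)
  have hcr := pv_scan_cat s "creative"
    ["creative", "design", "art", "concept", "vision", "innovative"]
    (by decide) (by decide)
  simp only [pvPriority, pvFirstFound, hb, he, ht, hcr, PySem.Str.isIn_eq, ← hs]
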